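-- pv_equiv track=rewrite | github.com/jana-strizak/connect4Game | gameStateEvaluation.py | possession
-- ===== SOURCE A (Python) =====
-- def findPlayerPawns(pawn, board):
--         """
--         gives location of all player pawns
--         """
--         players = []
--
--         # loop through entire board and find where the pawn is
--         for y in range(0,len(board[0])):
--             for x in range(len(board)):
--                 if board[x][y] == pawn:
--                     players.append((x,y))
--         return players
--
-- def possession(pawn, board):
--     """
--     quantify the possession of the board
--     if more of the pawns are in the center of the board, there is more freedom in movement
--     """
--     playerPawns = findPlayerPawns(pawn, board)
--     score = 0
--
--     for x, y in playerPawns: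
--         if (x >= 1 and x <= 5) and (y >= 1 and y <= 5):
--             score += 1 # 1 point
--             if (x >= 2 and x <= 4) and (y >= 2 and y <= 4):
--                 score += 1 # 2 points
--     return score
-- ===== SOURCE B (Python) =====
-- def possession(pawn, board):
--     """
--     quantify the possession of the board
--     if more of the pawns are in the center of the board, there is more freedom in movement
--     """
--     h = len(board)
--     w = len(board[0])
--     score = 0
--     # each pawn in the clipped 5x5 center [1..5]x[1..5] scores 1,
--     # and each pawn in the clipped 3x3 core [2..4]x[2..4] scores one more
--     for lo, hi in ((1, 5), (2, 4)):
--         for x in range(lo, min(hi + 1, h)):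
--             for y in range(lo, min(hi + 1, w)):
--                 if board[x][y] == pawn:
--                     score += 1
--     return score
-- ===== Notes on version B (the rewrite author's own statement) =====
-- stated objective: faster
-- what changed: A scans the entire board to collect all pawn coordinates and then scores them in a second pass; B never scans the board: it visits only the fixed scoring windows (the 5x5 center [1..5]x[1..5] and the 3x3 core [2..4]x[2..4], each clipped to the board dimensions) and counts matching cells there, so at most 34 cells are read regardless of board size.
import Mathlib
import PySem

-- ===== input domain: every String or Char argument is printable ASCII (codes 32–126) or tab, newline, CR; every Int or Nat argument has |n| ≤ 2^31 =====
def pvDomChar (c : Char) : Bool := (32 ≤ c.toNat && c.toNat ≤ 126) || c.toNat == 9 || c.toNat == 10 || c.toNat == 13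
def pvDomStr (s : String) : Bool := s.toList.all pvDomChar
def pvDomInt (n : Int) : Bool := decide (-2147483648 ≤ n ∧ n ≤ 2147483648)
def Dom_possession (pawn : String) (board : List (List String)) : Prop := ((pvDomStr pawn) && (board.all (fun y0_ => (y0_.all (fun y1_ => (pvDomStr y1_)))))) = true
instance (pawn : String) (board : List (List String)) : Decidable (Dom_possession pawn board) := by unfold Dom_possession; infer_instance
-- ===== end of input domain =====

-- B scores by visiting only the clipped 5x5 and 3x3 center windows (at most 34 cells) instead of scanning the whole board; objective: faster.


-- ===== PORT A =====
def findPlayerPawns (pawn : String) (board : List (List String)) : List (Int × Int) :=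
  (PySem.List.pyRange 0 ((PySem.List.pyGetD board 0 []).length : Int) 1).foldl (fun players y =>
    (PySem.List.pyRange 0 (board.length : Int) 1).foldl (fun players x =>
      if PySem.List.pyGetD (PySem.List.pyGetD board x []) y "" == pawn then
        players ++ [(x, y)]
      else players) players) []

def possession (pawn : String) (board : List (List String)) : Int :=
  (findPlayerPawns pawn board).foldl (fun score p =>
    if p.1 ≥ 1 ∧ p.1 ≤ 5 ∧ p.2 ≥ 1 ∧ p.2 ≤ 5 then
      (score + 1) + (if p.1 ≥ 2 ∧ p.1 ≤ 4 ∧ p.2 ≥ 2 ∧ p.2 ≤ 4 then 1 else 0)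
    else score) 0

-- ===== PORT B =====
def possession_alt (pawn : String) (board : List (List String)) : Int :=
  let h : Int := (board.length : Int)
  let w : Int := ((PySem.List.pyGetD board 0 []).length : Int)
  [((1 : Int), (5 : Int)), (2, 4)].foldl (fun score p =>
    (PySem.List.pyRange p.1 (min (p.2 + 1) h) 1).foldl (fun s x =>
      (PySem.List.pyRange p.1 (min (p.2 + 1) w) 1).foldl (fun s y =>
        if PySem.List.pyGetD (PySem.List.pyGetD board x []) y "" == pawn then s + 1
        else s) s) score) 0

-- ===== PRECONDITION & SPEC =====
-- Pre_ excludes exactly the inputs on which A raises IndexError: the empty board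
-- (board[0]) and ragged boards where some row is shorter than the first row.
def Pre_possession (pawn : String) (board : List (List String)) : Prop :=
  board ≠ [] ∧ ∀ row ∈ board, (board.headD []).length ≤ row.length

instance (pawn : String) (board : List (List String)) : Decidable (Pre_possession pawn board) := by
  unfold Pre_possession; infer_instance

def pvWitness_possession : String × List (List String) :=
  ("X", [["X", "."], [".", "X"]])

def Spec_possession (pawn : String) (board : List (List String)) (out : Int) : Prop := out = possession_alt pawn board
instance (pawn : String) (board : List (List String)) (out : Int) : Decidable (Spec_possession pawn board out) := by unfold Spec_possession; infer_instance

-- ===== CLAIM (what is proved, stated in full; the proofs are below) =====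
def Claim_equal_possession : Prop := ∀ (pawn : String) (board : List (List String)), Dom_possession pawn board → Pre_possession pawn board → Spec_possession pawn board (possession pawn board)

-- ===== LEMMAS AND PROOFS =====

-- 0/1 indicator of a cell holding the pawn
def pvInd (pawn : String) (board : List (List String)) (x y : Int) : Int :=
  if PySem.List.pyGetD (PySem.List.pyGetD board x []) y "" == pawn then 1 else 0

-- indicator restricted to the square zone [lo..hi] x [lo..hi]
def pvZInd (pawn : String) (board : List (List String)) (lo hi x y : Int) : Int :=
  if lo ≤ x ∧ x ≤ hi ∧ lo ≤ y ∧ y ≤ hi then pvInd pawn board x y else 0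

-- per-cell score of A (nested ifs exactly as A computes them)
def pvCell (pawn : String) (board : List (List String)) (x y : Int) : Int :=
  if PySem.List.pyGetD (PySem.List.pyGetD board x []) y "" == pawn then
    (if x ≥ 1 ∧ x ≤ 5 ∧ y ≥ 1 ∧ y ≤ 5 then
      1 + (if x ≥ 2 ∧ x ≤ 4 ∧ y ≥ 2 ∧ y ≤ 4 then 1 else 0) else 0)
  else 0

theorem pv_cell_split (pawn : String) (board : List (List String)) (x y : Int) :
    pvCell pawn board x y
      = pvZInd pawn board 1 5 x y + pvZInd pawn board 2 4 x y := by
  unfold pvCell pvZInd pvInd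
  split_ifs <;> omega

theorem pv_sum_filter {α : Type} (l : List α) (p : α → Bool) (f : α → Int) :
    ((l.filter p).map f).sum = (l.map (fun x => if p x then f x else 0)).sum := by
  induction l with
  | nil => rfl
  | cons a l ih => by_cases h : p a <;> simp [h, ih]

theorem pv_sum_swap {α β : Type} (l1 : List α) (l2 : List β) (f : α → β → Int) :
    (l1.map (fun a => (l2.map (f a)).sum)).sum
      = (l2.map (fun b => (l1.map (fun a => f a b)).sum)).sum := by
  induction l1 with
  | nil => simp
  | cons a l ih =>
    simp only [List.map_cons, List.sum_cons, ih, ← PySem.List.sum_map_add_int]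

theorem pvA_eq (pawn : String) (board : List (List String)) :
    possession pawn board
      = ((PySem.List.pyRange 0 ((PySem.List.pyGetD board 0 []).length : Int) 1).map
          (fun y => ((PySem.List.pyRange 0 (board.length : Int) 1).map
            (fun x => pvCell pawn board x y)).sum)).sum := by
  unfold possession findPlayerPawns
  rw [PySem.List.foldl_congr_mem _ _
      (fun (acc : List (Int × Int)) (y : Int) => acc ++
        ((PySem.List.pyRange 0 (board.length : Int) 1).filter
            (fun x => PySem.List.pyGetD (PySem.List.pyGetD board x []) y "" == pawn)).map
          (fun x => (x, y))) _
      (fun acc y _ => PySem.List.foldl_append_if _ _ _ _)]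
  rw [PySem.List.foldl_append_eq_flatMap, List.nil_append]
  have hstep : (fun (score : Int) (p : Int × Int) =>
      if p.1 ≥ 1 ∧ p.1 ≤ 5 ∧ p.2 ≥ 1 ∧ p.2 ≤ 5 then
        (score + 1) + (if p.1 ≥ 2 ∧ p.1 ≤ 4 ∧ p.2 ≥ 2 ∧ p.2 ≤ 4 then 1 else 0)
      else score)
    = fun score p => score +
        (if p.1 ≥ 1 ∧ p.1 ≤ 5 ∧ p.2 ≥ 1 ∧ p.2 ≤ 5 then
          1 + (if p.1 ≥ 2 ∧ p.1 ≤ 4 ∧ p.2 ≥ 2 ∧ p.2 ≤ 4 then 1 else 0) else 0) := by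
    funext score p
    split_ifs <;> ring
  rw [hstep, PySem.List.foldl_add, zero_add]
  rw [List.map_flatMap, List.flatMap_def, List.sum_flatten, List.map_map]
  apply congrArg
  apply List.map_congr_left
  intro y _
  simp only [Function.comp_apply]
  rw [List.map_map, pv_sum_filter]
  apply congrArg
  apply List.map_congr_left
  intro x _
  simp only [Function.comp_apply, pvCell]

-- clipping: a sum of zone-guarded terms over [0,n) is the plain sum over the clipped zone
theorem pv_clip (g : Int → Int) (lo hi n : Int) (h0 : 0 ≤ lo) (hlh : lo ≤ hi + 1) :
    ((PySem.List.pyRange 0 n 1).map (fun x => if lo ≤ x ∧ x ≤ hi then g x else 0)).sum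
      = ((PySem.List.pyRange lo (min (hi + 1) n) 1).map g).sum := by
  by_cases hn : n ≤ lo
  · rw [PySem.List.pyRange_one_eq_nil (le_trans (min_le_right _ _) hn)]
    apply List.sum_eq_zero
    intro z hz
    obtain ⟨x, hx, rfl⟩ := List.mem_map.mp hz
    have := (PySem.List.mem_pyRange_one.mp hx)
    rw [if_neg (by omega)]
  · rw [not_le] at hn
    have hm1 : lo ≤ min (hi + 1) n := le_min hlh (le_of_lt hn)
    have hm2 : min (hi + 1) n ≤ n := min_le_right _ _
    rw [PySem.List.pyRange_one_append 0 lo n h0 (le_of_lt hn),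
        PySem.List.pyRange_one_append lo (min (hi + 1) n) n hm1 hm2,
        List.map_append, List.map_append, List.sum_append, List.sum_append]
    have h1 : ((PySem.List.pyRange 0 lo 1).map (fun x => if lo ≤ x ∧ x ≤ hi then g x else 0)).sum = 0 := by
      apply List.sum_eq_zero
      intro z hz
      obtain ⟨x, hx, rfl⟩ := List.mem_map.mp hz
      have := PySem.List.mem_pyRange_one.mp hx
      rw [if_neg (by omega)]
    have h3 : ((PySem.List.pyRange (min (hi + 1) n) n 1).map (fun x => if lo ≤ x ∧ x ≤ hi then g x else 0)).sum = 0 := by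
      apply List.sum_eq_zero
      intro z hz
      obtain ⟨x, hx, rfl⟩ := List.mem_map.mp hz
      have := PySem.List.mem_pyRange_one.mp hx
      rw [if_neg (by omega)]
    have h2 : ((PySem.List.pyRange lo (min (hi + 1) n) 1).map (fun x => if lo ≤ x ∧ x ≤ hi then g x else 0)).sum
        = ((PySem.List.pyRange lo (min (hi + 1) n) 1).map g).sum := by
      apply congrArg
      apply List.map_congr_left
      intro x hx
      have := PySem.List.mem_pyRange_one.mp hx
      rw [if_pos (by omega)]
    rw [h1, h2, h3, zero_add, add_zero]

-- the double sum of one zone, clipped, equals the full-board double sum of its guarded indicator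
theorem pv_zone (pawn : String) (board : List (List String)) (lo hi : Int)
    (h0 : 0 ≤ lo) (hlh : lo ≤ hi + 1) :
    ((PySem.List.pyRange 0 (board.length : Int) 1).map
        (fun x => ((PySem.List.pyRange 0 ((PySem.List.pyGetD board 0 []).length : Int) 1).map
          (fun y => pvZInd pawn board lo hi x y)).sum)).sum
      = ((PySem.List.pyRange lo (min (hi + 1) (board.length : Int)) 1).map
          (fun x => ((PySem.List.pyRange lo (min (hi + 1) ((PySem.List.pyGetD board 0 []).length : Int)) 1).map
            (fun y => pvInd pawn board x y)).sum)).sum := by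
  have hx : ∀ x : Int,
      ((PySem.List.pyRange 0 ((PySem.List.pyGetD board 0 []).length : Int) 1).map
          (fun y => pvZInd pawn board lo hi x y)).sum
        = (if lo ≤ x ∧ x ≤ hi then
            ((PySem.List.pyRange lo (min (hi + 1) ((PySem.List.pyGetD board 0 []).length : Int)) 1).map
              (fun y => pvInd pawn board x y)).sum else 0) := by
    intro x
    by_cases hxz : lo ≤ x ∧ x ≤ hi
    · rw [if_pos hxz, ← pv_clip _ lo hi _ h0 hlh]
      apply congrArg
      apply List.map_congr_left
      intro y _
      unfold pvZInd
      by_cases hyz : lo ≤ y ∧ y ≤ hi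
      · rw [if_pos hyz, if_pos ⟨hxz.1, hxz.2, hyz.1, hyz.2⟩]
      · rw [if_neg hyz, if_neg (by tauto)]
    · rw [if_neg hxz]
      apply List.sum_eq_zero
      intro z hz
      obtain ⟨y, hy, rfl⟩ := List.mem_map.mp hz
      unfold pvZInd
      rw [if_neg (by tauto)]
  calc ((PySem.List.pyRange 0 (board.length : Int) 1).map
        (fun x => ((PySem.List.pyRange 0 ((PySem.List.pyGetD board 0 []).length : Int) 1).map
          (fun y => pvZInd pawn board lo hi x y)).sum)).sum
      = ((PySem.List.pyRange 0 (board.length : Int) 1).map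
        (fun x => if lo ≤ x ∧ x ≤ hi then
            ((PySem.List.pyRange lo (min (hi + 1) ((PySem.List.pyGetD board 0 []).length : Int)) 1).map
              (fun y => pvInd pawn board x y)).sum else 0)).sum := by
        apply congrArg; exact List.map_congr_left (fun x _ => hx x)
    _ = _ := pv_clip _ lo hi _ h0 hlh

-- B as the sum of the two clipped-zone double sums
theorem pvB_eq (pawn : String) (board : List (List String)) :
    possession_alt pawn board
      = ((PySem.List.pyRange 1 (min 6 (board.length : Int)) 1).map
          (fun x => ((PySem.List.pyRange 1 (min 6 ((PySem.List.pyGetD board 0 []).length : Int)) 1).map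
            (fun y => pvInd pawn board x y)).sum)).sum
        + ((PySem.List.pyRange 2 (min 5 (board.length : Int)) 1).map
          (fun x => ((PySem.List.pyRange 2 (min 5 ((PySem.List.pyGetD board 0 []).length : Int)) 1).map
            (fun y => pvInd pawn board x y)).sum)).sum := by
  unfold possession_alt
  simp only [List.foldl_cons, List.foldl_nil]
  have hzone : ∀ (acc : Int) (lo b1 b2 : Int),
      (PySem.List.pyRange lo b1 1).foldl (fun s x =>
        (PySem.List.pyRange lo b2 1).foldl (fun s y =>
          if PySem.List.pyGetD (PySem.List.pyGetD board x []) y "" == pawn then s + 1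
          else s) s) acc
        = acc + ((PySem.List.pyRange lo b1 1).map
            (fun x => ((PySem.List.pyRange lo b2 1).map (fun y => pvInd pawn board x y)).sum)).sum := by
    intro acc lo b1 b2
    have hin : (fun (s : Int) (x : Int) =>
        (PySem.List.pyRange lo b2 1).foldl (fun s y =>
          if PySem.List.pyGetD (PySem.List.pyGetD board x []) y "" == pawn then s + 1
          else s) s)
      = fun s x => s + ((PySem.List.pyRange lo b2 1).map (fun y => pvInd pawn board x y)).sum := by
      funext s x
      have h2 : (fun (s : Int) (y : Int) =>
          if PySem.List.pyGetD (PySem.List.pyGetD board x []) y "" == pawn then s + 1 else s)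
        = fun s y => s + pvInd pawn board x y := by
        funext s y
        unfold pvInd
        split_ifs <;> ring
      rw [h2, PySem.List.foldl_add]
    rw [hin, PySem.List.foldl_add]
  rw [hzone, hzone, zero_add]
  norm_num

-- ===== VERDICT (by name: the statement is the Claim_ definition above) =====
theorem possession_spec : Claim_equal_possession := by
  intro pawn board _ _
  unfold Spec_possession
  rw [pvA_eq, pvB_eq, pv_sum_swap]
  have hsplit : ((PySem.List.pyRange 0 (board.length : Int) 1).map
      (fun x => ((PySem.List.pyRange 0 ((PySem.List.pyGetD board 0 []).length : Int) 1).map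
        (fun y => pvCell pawn board x y)).sum)).sum
    = ((PySem.List.pyRange 0 (board.length : Int) 1).map
        (fun x => ((PySem.List.pyRange 0 ((PySem.List.pyGetD board 0 []).length : Int) 1).map
          (fun y => pvZInd pawn board 1 5 x y)).sum)).sum
      + ((PySem.List.pyRange 0 (board.length : Int) 1).map
        (fun x => ((PySem.List.pyRange 0 ((PySem.List.pyGetD board 0 []).length : Int) 1).map
          (fun y => pvZInd pawn board 2 4 x y)).sum)).sum := by
    rw [← PySem.List.sum_map_add_int]
    apply congrArg
    apply List.map_congr_left
    intro x _
    rw [← PySem.List.sum_map_add_int]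
    apply congrArg
    apply List.map_congr_left
    intro y _
    exact pv_cell_split pawn board x y
  rw [hsplit, pv_zone pawn board 1 5 (by norm_num) (by norm_num),
      pv_zone pawn board 2 4 (by norm_num) (by norm_num)]
  norm_num
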